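-- pv_equiv track=rewrite | github.com/calvinchankf/GoogleCodeJam | 2021/qualification/b.py | f
-- ===== SOURCE A (Python) =====
-- def f(X, Y, S):
--     n = len(S)
--     arr = [c for c in S]
--     res = 0
--     for i in range(n-2, -1, -1):
--
--         if arr[i] == '?':
--             if arr[i+1] == 'C':
--                 arr[i] = 'C'
--             elif arr[i+1] == 'J':
--                 arr[i] = 'J'
--
--         if arr[i] == 'C' and arr[i+1] == 'J':
--             res += X
--         elif arr[i] == 'J' and arr[i+1] == 'C':
--             res += Y
--     return res
-- ===== SOURCE B (Python) =====
-- def f(X, Y, S):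
--     t = [c for c in S if c != '?']
--     res = 0
--     for a, b in zip(t, t[1:]):
--         if a == 'C' and b == 'J':
--             res += X
--         elif a == 'J' and b == 'C':
--             res += Y
--     return res
-- ===== Notes on version B (the rewrite author's own statement) =====
-- stated objective: simpler
-- what changed: Replaced A's right-to-left greedy pass that mutates the array to fill '?' and accumulates pair costs with a filter that drops all '?' characters followed by a single scan over adjacent pairs of the remaining characters (a '?' run never contributes interior cost and inherits its right neighbour, so only the surviving adjacent pairs matter).
import Mathlib
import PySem

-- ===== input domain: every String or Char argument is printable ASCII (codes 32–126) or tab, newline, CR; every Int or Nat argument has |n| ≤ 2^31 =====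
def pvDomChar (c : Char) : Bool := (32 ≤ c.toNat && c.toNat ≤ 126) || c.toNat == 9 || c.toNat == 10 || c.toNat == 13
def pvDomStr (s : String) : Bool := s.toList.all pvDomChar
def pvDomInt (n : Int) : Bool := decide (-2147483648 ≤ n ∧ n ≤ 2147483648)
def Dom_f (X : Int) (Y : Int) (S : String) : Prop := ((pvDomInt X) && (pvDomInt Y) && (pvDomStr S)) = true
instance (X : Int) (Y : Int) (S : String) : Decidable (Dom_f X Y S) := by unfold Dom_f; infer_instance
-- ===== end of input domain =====

-- B replaces A's right-to-left greedy fill-and-mutate pass by dropping the '?'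
-- characters and scanning adjacent pairs of the remaining characters (objective: simpler).

-- ===== PORT A =====
-- loop body of A's for-loop (named helper; the indices i and i+1 are always in
-- range 0..n-1 during the loop, where pyGetD/pySetD are exact)
def stepA (X Y : Int) (st : List Char × Int) (i : Int) : List Char × Int :=
  let arr := st.1
  let res := st.2
  let arr :=
    if PySem.List.pyGetD arr i ' ' = '?' then
      if PySem.List.pyGetD arr (i+1) ' ' = 'C' then PySem.List.pySetD arr i 'C'
      else if PySem.List.pyGetD arr (i+1) ' ' = 'J' then PySem.List.pySetD arr i 'J'
      else arr
    else arr
  let res :=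
    if PySem.List.pyGetD arr i ' ' = 'C' ∧ PySem.List.pyGetD arr (i+1) ' ' = 'J' then res + X
    else if PySem.List.pyGetD arr i ' ' = 'J' ∧ PySem.List.pyGetD arr (i+1) ' ' = 'C' then res + Y
    else res
  (arr, res)

def f (X : Int) (Y : Int) (S : String) : Int :=
  let n : Int := (S.toList.length : Int)
  let arr := S.toList
  ((PySem.List.pyRange (n-2) (-1) (-1)).foldl (stepA X Y) (arr, 0)).2

-- ===== PORT B =====
def f_alt (X : Int) (Y : Int) (S : String) : Int :=
  let t := S.toList.filter (fun c => c ≠ '?')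
  (t.zip (t.drop 1)).foldl
    (fun res ab =>
      if ab.1 = 'C' ∧ ab.2 = 'J' then res + X
      else if ab.1 = 'J' ∧ ab.2 = 'C' then res + Y
      else res) 0

-- ===== PRECONDITION & SPEC =====
def Spec_f (X : Int) (Y : Int) (S : String) (out : Int) : Prop := out = f_alt X Y S
instance (X : Int) (Y : Int) (S : String) (out : Int) : Decidable (Spec_f X Y S out) := by unfold Spec_f; infer_instance

-- ===== CLAIM (what is proved, stated in full; the proofs are below) =====
def Claim_equal_f : Prop := ∀ (X : Int) (Y : Int) (S : String), Dom_f X Y S → Spec_f X Y S (f X Y S)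

-- ===== LEMMAS AND PROOFS =====

def pvCost (X Y : Int) (a b : Char) : Int :=
  if a = 'C' ∧ b = 'J' then X else if a = 'J' ∧ b = 'C' then Y else 0

def pvFill (c d : Char) : Char :=
  if c = '?' then (if d = 'C' then 'C' else if d = 'J' then 'J' else c) else c

-- the final filled array of A's loop
def pvAfix : List Char → List Char
  | [] => []
  | [c] => [c]
  | c :: d :: ds => pvFill c ((pvAfix (d :: ds)).headI) :: pvAfix (d :: ds)

-- the accumulated res of A's loop
def pvAres (X Y : Int) : List Char → Int
  | [] => 0
  | [_] => 0
  | c :: d :: ds =>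
    pvAres X Y (d :: ds) +
      pvCost X Y (pvFill c ((pvAfix (d :: ds)).headI)) ((pvAfix (d :: ds)).headI)

-- pair sum B computes on the filtered list
def pvBs (X Y : Int) : List Char → Int
  | a :: b :: rest => pvCost X Y a b + pvBs X Y (b :: rest)
  | _ => 0

theorem pvAfix_ne_nil (l : List Char) (h : l ≠ []) : pvAfix l ≠ [] := by
  match l with
  | [c] => simp [pvAfix]
  | c :: d :: ds => simp [pvAfix]

theorem pvCost_nonCJ (X Y : Int) (a b : Char) (h1 : b ≠ 'C') (h2 : b ≠ 'J') :
    pvCost X Y a b = 0 := by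
  unfold pvCost; split_ifs <;> simp_all

theorem pvAfix_cons (c : Char) (q : List Char) (hq : q ≠ []) :
    pvAfix (c :: q) = pvFill c ((pvAfix q).headI) :: pvAfix q := by
  cases q with
  | nil => exact absurd rfl hq
  | cons d ds => rfl

theorem pvAres_cons (X Y : Int) (c : Char) (q : List Char) (hq : q ≠ []) :
    pvAres X Y (c :: q) =
      pvAres X Y q + pvCost X Y (pvFill c ((pvAfix q).headI)) ((pvAfix q).headI) := by
  cases q with
  | nil => exact absurd rfl hq
  | cons d ds => rfl

theorem pv_set_mid (p A : List Char) (c v : Char) :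
    (p ++ c :: A).set p.length v = p ++ v :: A := by
  induction p with
  | nil => rfl
  | cons x xs ih => simp [ih]

theorem pv_get_mid (p A : List Char) (c : Char) :
    PySem.List.pyGetD (p ++ c :: A) ((p.length : Nat) : Int) ' ' = c := by
  simp [PySem.List.pyGetD_natCast, List.getD_eq_getElem?_getD]

theorem pv_get_mid_succ (p A : List Char) (c : Char) (hA : A ≠ []) :
    PySem.List.pyGetD (p ++ c :: A) (((p.length : Nat) : Int) + 1) ' ' = A.headI := by
  have h1 : ((p.length : Nat) : Int) + 1 = ((p.length + 1 : Nat) : Int) := by push_cast; ring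
  rw [h1, PySem.List.pyGetD_natCast]
  cases A with
  | nil => exact absurd rfl hA
  | cons b bs =>
    simp [List.getD_eq_getElem?_getD]

-- one iteration of A's loop, at index p.length, on an array whose suffix past
-- position p.length is already finalized
theorem stepA_eq (X Y : Int) (p : List Char) (c : Char) (q : List Char) (hq : q ≠ []) (r : Int) :
    stepA X Y (p ++ c :: pvAfix q, r) ((p.length : Nat) : Int) =
      (p ++ pvAfix (c :: q),
        r + pvCost X Y (pvFill c ((pvAfix q).headI)) ((pvAfix q).headI)) := by
  have hA : pvAfix q ≠ [] := pvAfix_ne_nil q hq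
  set A := pvAfix q with hAdef
  have g0 : PySem.List.pyGetD (p ++ c :: A) ((p.length : Nat) : Int) ' ' = c :=
    pv_get_mid p A c
  have g1 : PySem.List.pyGetD (p ++ c :: A) (((p.length : Nat) : Int) + 1) ' ' = A.headI :=
    pv_get_mid_succ p A c hA
  have hAfx : pvAfix (c :: q) = pvFill c A.headI :: A := pvAfix_cons c q hq
  unfold stepA
  by_cases hc : c = '?'
  · subst hc
    by_cases h1 : A.headI = 'C'
    · have gs : PySem.List.pySetD (p ++ '?' :: A) ((p.length : Nat) : Int) 'C' = p ++ 'C' :: A := by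
        rw [PySem.List.pySetD_natCast, pv_set_mid]
      simp only [g0, g1, if_pos h1, gs]
      have g0' : PySem.List.pyGetD (p ++ 'C' :: A) ((p.length : Nat) : Int) ' ' = 'C' :=
        pv_get_mid p A 'C'
      have g1' : PySem.List.pyGetD (p ++ 'C' :: A) (((p.length : Nat) : Int) + 1) ' ' = A.headI :=
        pv_get_mid_succ p A 'C' hA
      simp only [hAfx, pvFill, pvCost, h1]
      split_ifs <;> simp_all
    · by_cases h2 : A.headI = 'J'
      · have gs : PySem.List.pySetD (p ++ '?' :: A) ((p.length : Nat) : Int) 'J' = p ++ 'J' :: A := by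
          rw [PySem.List.pySetD_natCast, pv_set_mid]
        simp only [g0, g1, if_neg h1, if_pos h2, gs]
        have g0' : PySem.List.pyGetD (p ++ 'J' :: A) ((p.length : Nat) : Int) ' ' = 'J' :=
          pv_get_mid p A 'J'
        have g1' : PySem.List.pyGetD (p ++ 'J' :: A) (((p.length : Nat) : Int) + 1) ' ' = A.headI :=
          pv_get_mid_succ p A 'J' hA
        simp only [hAfx, pvFill, pvCost, h2]
        split_ifs <;> simp_all
      · simp only [g0, g1, if_neg h1, if_neg h2, hAfx, pvFill, pvCost]
        split_ifs <;> simp_all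
  · simp only [g0, g1, if_neg hc, hAfx, pvFill, pvCost]
    split_ifs <;> simp_all

theorem pv_inv (X Y : Int) (l : List Char) : ∀ (j : Nat), j < l.length →
    (PySem.List.pyRange ((j : Int) - 1) (-1) (-1)).foldl (stepA X Y)
        (l.take j ++ pvAfix (l.drop j), pvAres X Y (l.drop j)) =
      (pvAfix l, pvAres X Y l) := by
  intro j
  induction j with
  | zero =>
    intro _
    rw [show ((0 : Nat) : Int) - 1 = -1 by norm_num,
      PySem.List.pyRange_neg_one_eq_nil (le_refl (-1))]
    simp
  | succ j ih =>
    intro hj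
    have hj' : j < l.length := Nat.lt_of_succ_lt hj
    have hq : l.drop (j + 1) ≠ [] := by
      simp only [ne_eq, List.drop_eq_nil_iff]; omega
    have hcast : ((j + 1 : Nat) : Int) - 1 = ((j : Nat) : Int) := by push_cast; ring
    rw [hcast, PySem.List.pyRange_neg_one_cons (by omega : (-1 : Int) < ((j : Nat) : Int))]
    rw [List.foldl_cons]
    have htake : l.take (j + 1) = l.take j ++ [l[j]] := by
      rw [List.take_add_one]; simp [List.getElem?_eq_getElem hj']
    have hdrop : l.drop j = l[j] :: l.drop (j + 1) := List.drop_eq_getElem_cons hj'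
    have hlen : (l.take j).length = j := by simp; omega
    have harr : l.take (j + 1) ++ pvAfix (l.drop (j + 1)) =
        l.take j ++ l[j] :: pvAfix (l.drop (j + 1)) := by
      rw [htake, List.append_assoc]; rfl
    have hstep := stepA_eq X Y (l.take j) l[j] (l.drop (j + 1)) hq (pvAres X Y (l.drop (j + 1)))
    rw [hlen] at hstep
    rw [harr, hstep]
    rw [← pvAres_cons X Y l[j] (l.drop (j + 1)) hq, ← hdrop]
    exact ih hj'

theorem pv_loop_eq (X Y : Int) (l : List Char) :
    (List.foldl (stepA X Y) (l, 0) (PySem.List.pyRange ((l.length : Int) - 2) (-1) (-1))).2 =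
      pvAres X Y l := by
  cases hln : l with
  | nil =>
    rw [show ((([] : List Char).length : Int)) - 2 = -2 by simp,
      PySem.List.pyRange_neg_one_eq_nil (by norm_num : (-2 : Int) ≤ -1)]
    rfl
  | cons c cs =>
    rw [← hln]
    have hpos : 0 < l.length := by rw [hln]; simp
    have h1 : l.length - 1 < l.length := by omega
    have hinv := pv_inv X Y l (l.length - 1) h1
    have hcast : (l.length : Int) - 2 = ((l.length - 1 : Nat) : Int) - 1 := by omega
    have hdrop1 : l.drop (l.length - 1) = [l[l.length - 1]] := by
      rw [List.drop_eq_getElem_cons h1]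
      simp [show l.length - 1 + 1 = l.length by omega]
    have hinit : l.take (l.length - 1) ++ pvAfix (l.drop (l.length - 1)) = l := by
      rw [hdrop1]
      show l.take (l.length - 1) ++ [l[l.length - 1]] = l
      have h2 : l.take (l.length - 1 + 1) = l.take (l.length - 1) ++ [l[l.length - 1]] := by
        rw [List.take_add_one]; simp [List.getElem?_eq_getElem h1]
      have h3 : l.length - 1 + 1 = l.length := by omega
      rw [← h2, h3, List.take_length]
    have hres0 : pvAres X Y (l.drop (l.length - 1)) = 0 := by rw [hdrop1]; rfl
    rw [hcast, show (l, (0 : Int)) =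
        (l.take (l.length - 1) ++ pvAfix (l.drop (l.length - 1)),
          pvAres X Y (l.drop (l.length - 1))) from by rw [hinit, hres0]]
    exact congrArg Prod.snd hinv

theorem pv_f_eq_Ares (X Y : Int) (S : String) : f X Y S = pvAres X Y S.toList := by
  show (List.foldl (stepA X Y) (S.toList, 0)
      (PySem.List.pyRange ((S.toList.length : Int) - 2) (-1) (-1))).2 = pvAres X Y S.toList
  exact pv_loop_eq X Y S.toList

theorem pv_Ares_eq_Bs (X Y : Int) (l : List Char) :
    pvAres X Y l = pvBs X Y (l.filter (fun c => c ≠ '?')) ∧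
      ∀ a, pvCost X Y a (pvAfix l).headI =
        pvCost X Y a ((l.filter (fun c => c ≠ '?')).headI) := by
  match l with
  | [] => exact ⟨rfl, fun a => rfl⟩
  | [c] =>
    refine ⟨?_, fun a => ?_⟩
    · by_cases hc : c = '?' <;> simp [pvAres, pvBs, hc]
    · by_cases hc : c = '?'
      · subst hc
        have e1 : (pvAfix ['?']).headI = '?' := rfl
        have e2 : ((['?'].filter (fun c => c ≠ '?'))).headI = 'A' := rfl
        rw [e1, e2, pvCost_nonCJ X Y a '?' (by decide) (by decide),
            pvCost_nonCJ X Y a 'A' (by decide) (by decide)]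
      · have e1 : (pvAfix [c]).headI = c := rfl
        have e2 : (([c].filter (fun x => x ≠ '?'))).headI = c := by simp [hc]
        rw [e1, e2]
  | c :: d :: ds =>
    obtain ⟨ih1, ih2⟩ := pv_Ares_eq_Bs X Y (d :: ds)
    set rest := d :: ds with hrest
    have hA : pvAres X Y (c :: rest) =
        pvAres X Y rest + pvCost X Y (pvFill c ((pvAfix rest).headI)) ((pvAfix rest).headI) := rfl
    have hAf : pvAfix (c :: rest) = pvFill c ((pvAfix rest).headI) :: pvAfix rest := rfl
    by_cases hc : c = '?'
    · subst hc
      have hfil : ((('?' : Char) :: rest).filter (fun c => c ≠ '?')) =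
          rest.filter (fun c => c ≠ '?') := by simp
      set h := (pvAfix rest).headI with hh
      constructor
      · rw [hA, hfil, ← ih1]
        have : pvCost X Y (pvFill '?' h) h = 0 := by
          unfold pvFill pvCost; split_ifs <;> simp_all
        omega
      · intro a
        rw [hAf, hfil]
        have hh' : (pvFill '?' h :: pvAfix rest).headI = pvFill '?' h := rfl
        rw [hh']
        by_cases h1 : h = 'C'
        · have : pvFill '?' h = h := by simp [pvFill, h1]
          rw [this]; exact ih2 a
        · by_cases h2 : h = 'J'
          · have : pvFill '?' h = h := by simp [pvFill, h2]
            rw [this]; exact ih2 a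
          · have hq : pvFill '?' h = '?' := by simp [pvFill, h1, h2]
            rw [hq, ← ih2 a, pvCost_nonCJ X Y a h h1 h2,
                pvCost_nonCJ X Y a '?' (by decide) (by decide)]
    · have hfil : ((c :: rest).filter (fun x => x ≠ '?')) =
          c :: rest.filter (fun x => x ≠ '?') := by simp [hc]
      have hfc : pvFill c ((pvAfix rest).headI) = c := by simp [pvFill, hc]
      constructor
      · rw [hA, hfil, hfc, ih1, ih2 c]
        cases hf : rest.filter (fun x => x ≠ '?') with
        | nil =>
          simp [pvBs, List.headI, pvCost_nonCJ X Y c 'A' (by decide) (by decide)]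
        | cons e es => simp [pvBs, List.headI]; ring
      · intro a
        rw [hAf, hfc, hfil]
        rfl

theorem pv_foldl_zip (X Y : Int) (t : List Char) (r : Int) :
    (t.zip (t.drop 1)).foldl
        (fun res ab =>
          if ab.1 = 'C' ∧ ab.2 = 'J' then res + X
          else if ab.1 = 'J' ∧ ab.2 = 'C' then res + Y
          else res) r = r + pvBs X Y t := by
  match t with
  | [] => simp [pvBs]
  | [a] => simp [pvBs]
  | a :: b :: rest =>
    have ih := pv_foldl_zip X Y (b :: rest) (if a = 'C' ∧ b = 'J' then r + X
      else if a = 'J' ∧ b = 'C' then r + Y else r)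
    simp only [List.drop_succ_cons, List.drop_zero, List.zip_cons_cons, List.foldl_cons] at ih ⊢
    rw [ih, pvBs, pvCost]
    split_ifs <;> ring

theorem pv_falt_eq_Bs (X Y : Int) (S : String) :
    f_alt X Y S = pvBs X Y (S.toList.filter (fun c => c ≠ '?')) := by
  unfold f_alt
  rw [pv_foldl_zip]
  ring

-- ===== VERDICT (by name: the statement is the Claim_ definition above) =====
theorem f_spec : Claim_equal_f := by
  intro X Y S _
  unfold Spec_f
  rw [pv_f_eq_Ares, pv_falt_eq_Bs, (pv_Ares_eq_Bs X Y S.toList).1]
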